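-- pv_equiv track=rewrite | github.com/can-gurkan/LEAR | src/utils/qd-verification/verify_movement_params.py | strip_final_block
-- ===== SOURCE A (Python) =====
-- def strip_final_block(code: str) -> str:
--     """
--     Remove the very last bracketed block [...]
--     so none of its commands will be extracted.
--     """
--
--     start = code.rfind('[')
--     if start == -1:
--         return code
--
--     depth = 0
--     for i in range(start, len(code)):
--         if code[i] == '[':
--             depth += 1
--         elif code[i] == ']':
--             depth -= 1
--             if depth == 0:
--                 return code[:start] + code[i+1:]
--     return code
-- ===== SOURCE B (Python) =====
-- def strip_final_block(code: str) -> str: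
--     """
--     Remove the very last bracketed block [...]
--     so none of its commands will be extracted.
--     """
--     start = code.rfind('[')
--     if start == -1:
--         return code
--     end = code.find(']', start)
--     if end == -1:
--         return code
--     return code[:start] + code[end + 1:]
-- ===== Notes on version B (the rewrite author's own statement) =====
-- stated objective: simpler
-- what changed: Replaced the explicit index loop with a depth counter (which is vestigial, since rfind already returns the last '[') by two string searches: rfind('[') then find(']', start), splicing out that span.
import Mathlib
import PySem

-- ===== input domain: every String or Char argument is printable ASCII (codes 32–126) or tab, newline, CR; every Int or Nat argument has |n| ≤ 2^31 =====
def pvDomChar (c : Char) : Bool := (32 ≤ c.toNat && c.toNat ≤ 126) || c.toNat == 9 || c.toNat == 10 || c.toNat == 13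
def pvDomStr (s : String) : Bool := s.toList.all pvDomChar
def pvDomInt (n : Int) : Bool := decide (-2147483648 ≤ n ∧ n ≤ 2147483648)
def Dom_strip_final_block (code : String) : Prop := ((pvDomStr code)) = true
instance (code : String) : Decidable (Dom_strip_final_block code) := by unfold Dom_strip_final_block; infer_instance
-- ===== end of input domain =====

-- ===== PORT A =====
-- B removes the dead depth counter: one honest line — the loop is replaced by two string searches.
-- Loop "for i in range(start, len(code))" of A, carrying the depth counter; returns `code` when it runs off the end.
def stripLoopA (code : String) (cs : List Char) (start i : Nat) (depth : Int) : String :=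
  if h : i < cs.length then
    if cs[i] = '[' then stripLoopA code cs start (i+1) (depth+1)
    else if cs[i] = ']' then
      (if depth - 1 = 0 then String.ofList (cs.take start ++ cs.drop (i+1))
       else stripLoopA code cs start (i+1) (depth-1))
    else stripLoopA code cs start (i+1) depth
  else code
termination_by cs.length - i

def strip_final_block (code : String) : String :=
  let cs := code.toList
  let start := PySem.Chars.rfind cs ['[']
  if start = -1 then code
  else stripLoopA code cs start.toNat start.toNat 0

-- ===== PORT B =====
def strip_final_block_alt (code : String) : String :=
  let start := PySem.Str.rfind code "["
  if start = -1 then code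
  else
    let e := PySem.Str.findFrom code "]" start none
    if e = -1 then code
    else String.ofList (PySem.List.slice code.toList none (some start) ++
                        PySem.List.slice code.toList (some (e+1)) none)

-- ===== PRECONDITION & SPEC =====
def Spec_strip_final_block (code : String) (out : String) : Prop := out = strip_final_block_alt code
instance (code : String) (out : String) : Decidable (Spec_strip_final_block code out) := by unfold Spec_strip_final_block; infer_instance

-- ===== CLAIM (what is proved, stated in full; the proofs are below) =====
def Claim_equal_strip_final_block : Prop := ∀ (code : String), Dom_strip_final_block code → Spec_strip_final_block code (strip_final_block code)

-- ===== LEMMAS AND PROOFS =====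

-- the least index j ≥ i with cs[j] = ']' (proof-side description of what both programs locate)
def firstClose (cs : List Char) (i : Nat) : Option Nat :=
  if h : i < cs.length then (if cs[i] = ']' then some i else firstClose cs (i+1)) else none
termination_by cs.length - i

lemma rfind_go_spec (s sub : List Char) (n : Nat) :
    (PySem.Chars.rfind.go s sub n = -1 ∧ ∀ j ≤ n, ¬ sub <+: s.drop j)
    ∨ (∃ k : Nat, k ≤ n ∧ PySem.Chars.rfind.go s sub n = (k : Int) ∧
        sub <+: s.drop k ∧
        ∀ j, k < j → j ≤ n → ¬ sub <+: s.drop j) := by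
  induction n with
  | zero =>
      by_cases h : sub <+: s
      · right
        exact ⟨0, le_refl _, by simp [PySem.Chars.rfind.go, List.isPrefixOf_iff_prefix, h],
          by simpa using h, by omega⟩
      · left
        constructor
        · simp [PySem.Chars.rfind.go, List.isPrefixOf_iff_prefix, h]
        · intro j hj; interval_cases j; simpa using h
  | succ n ih =>
      by_cases h : sub <+: s.drop (n+1)
      · right
        exact ⟨n+1, le_refl _, by simp [PySem.Chars.rfind.go, List.isPrefixOf_iff_prefix, h],
          h, by omega⟩
      · rcases ih with ⟨h1, h2⟩ | ⟨k, hk, hgo, hpre, hmax⟩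
        · left
          refine ⟨by simp [PySem.Chars.rfind.go, List.isPrefixOf_iff_prefix, h, h1], ?_⟩
          intro j hj
          rcases Nat.lt_or_ge j (n+1) with hj' | hj'
          · exact h2 j (by omega)
          · have : j = n+1 := by omega
            subst this; exact h
        · right
          refine ⟨k, by omega, by simp [PySem.Chars.rfind.go, List.isPrefixOf_iff_prefix, h, hgo], hpre, ?_⟩
          intro j hjk hj
          rcases Nat.lt_or_ge j (n+1) with hj' | hj'
          · exact hmax j hjk (by omega)
          · have : j = n+1 := by omega
            subst this; exact h

lemma single_prefix_iff (c : Char) (l : List Char) (j : Nat) :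
    [c] <+: l.drop j ↔ l[j]? = some c := by
  rw [← List.head?_drop]
  cases h : l.drop j with
  | nil => simp
  | cons x t => simp [List.cons_prefix_cons, eq_comm]

lemma firstClose_none_iff (cs : List Char) (i : Nat) :
    firstClose cs i = none ↔ ∀ j, i ≤ j → cs[j]? ≠ some ']' := by
  have main : ∀ n i, cs.length - i ≤ n →
      (firstClose cs i = none ↔ ∀ j, i ≤ j → cs[j]? ≠ some ']') := by
    intro n
    induction n with
    | zero =>
        intro i hi
        rw [firstClose]
        simp only [dif_neg (by omega : ¬ i < cs.length)]
        constructor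
        · intro _ j hj hcj
          rw [List.getElem?_eq_none (by omega : cs.length ≤ j)] at hcj
          exact absurd hcj (by simp)
        · intro _; trivial
    | succ n ih =>
        intro i hi
        by_cases h : i < cs.length
        · rw [firstClose]
          by_cases hc : cs[i] = ']'
          · simp only [dif_pos h, if_pos hc]
            constructor
            · intro hcontra; exact absurd hcontra (by simp)
            · intro hall
              exact absurd (by rw [List.getElem?_eq_getElem h, hc]) (hall i le_rfl)
          · simp only [dif_pos h, if_neg hc]
            rw [ih (i+1) (by omega)]
            constructor
            · intro hall j hj hcj
              rcases Nat.eq_or_lt_of_le hj with rfl | hj'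
              · rw [List.getElem?_eq_getElem h] at hcj
                exact hc (by injection hcj)
              · exact hall j (by omega) hcj
            · intro hall j hj; exact hall j (by omega)
        · rw [firstClose]
          simp only [dif_neg h]
          constructor
          · intro _ j hj hcj
            rw [List.getElem?_eq_none (by omega : cs.length ≤ j)] at hcj
            exact absurd hcj (by simp)
          · intro _; trivial
  exact main cs.length i (by omega)

lemma firstClose_eq_some (cs : List Char) (i k : Nat) (hik : i ≤ k)
    (hk : cs[k]? = some ']') (hmin : ∀ j, i ≤ j → j < k → cs[j]? ≠ some ']') :
    firstClose cs i = some k := by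
  have hklen : k < cs.length := by
    by_contra h
    rw [List.getElem?_eq_none (by omega : cs.length ≤ k)] at hk
    exact absurd hk (by simp)
  have main : ∀ n i, k - i ≤ n → i ≤ k →
      (∀ j, i ≤ j → j < k → cs[j]? ≠ some ']') → firstClose cs i = some k := by
    intro n
    induction n with
    | zero =>
        intro i hn hik _
        have : i = k := by omega
        subst this
        rw [firstClose]
        simp only [dif_pos hklen]
        rw [if_pos (by rw [List.getElem?_eq_getElem hklen] at hk; injection hk)]
    | succ n ih =>
        intro i hn hik hmin
        rcases Nat.eq_or_lt_of_le hik with rfl | hik'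
        · rw [firstClose]
          simp only [dif_pos hklen]
          rw [if_pos (by rw [List.getElem?_eq_getElem hklen] at hk; injection hk)]
        · have hilen : i < cs.length := by omega
          have hci : cs[i] ≠ ']' := by
            intro hc
            exact hmin i le_rfl hik' (by rw [List.getElem?_eq_getElem hilen, hc])
          rw [firstClose]
          simp only [dif_pos hilen, if_neg hci]
          exact ih (i+1) (by omega) (by omega) (fun j hj hj' => hmin j (by omega) hj')
  exact main k i (by omega) hik hmin

-- A's loop at depth 1, past the last '[': it returns according to the first ']' from i on.
lemma loopA_depth_one (code : String) (cs : List Char) (start : Nat) (i : Nat)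
    (hno : ∀ j, i ≤ j → cs[j]? ≠ some '[') :
    stripLoopA code cs start i 1 =
      match firstClose cs i with
      | none => code
      | some e => String.ofList (cs.take start ++ cs.drop (e+1)) := by
  have main : ∀ n i, cs.length - i ≤ n → (∀ j, i ≤ j → cs[j]? ≠ some '[') →
      stripLoopA code cs start i 1 =
        match firstClose cs i with
        | none => code
        | some e => String.ofList (cs.take start ++ cs.drop (e+1)) := by
    intro n
    induction n with
    | zero =>
        intro i hn _
        have h : ¬ i < cs.length := by omega
        rw [stripLoopA, firstClose]
        simp only [dif_neg h]
    | succ n ih =>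
        intro i hn hno
        by_cases h : i < cs.length
        · have hci : cs[i] ≠ '[' := by
            intro hc
            exact hno i le_rfl (by rw [List.getElem?_eq_getElem h, hc])
          rw [stripLoopA, firstClose]
          by_cases hc : cs[i] = ']'
          · simp only [dif_pos h, if_neg hci, if_pos hc]
            norm_num
          · simp only [dif_pos h, if_neg hci, if_neg hc]
            exact ih (i+1) (by omega) (fun j hj => hno j (by omega))
        · rw [stripLoopA, firstClose]
          simp only [dif_neg h]
  exact main cs.length i (by omega) hno

theorem strip_final_block_spec : Claim_equal_strip_final_block := by
  intro code _
  show strip_final_block code = strip_final_block_alt code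
  have htl : ("[" : String).toList = ['['] := rfl
  have htl2 : ("]" : String).toList = [']'] := rfl
  simp only [strip_final_block, strip_final_block_alt, PySem.Str.rfind_eq,
    PySem.Str.findFrom_eq, htl, htl2, PySem.Chars.rfind]
  rcases rfind_go_spec code.toList ['['] code.toList.length with ⟨hgo, _⟩ | ⟨k, hk, hgo, hpre, hmax⟩
  · rw [hgo]; simp
  · rw [hgo]
    have hkne : ((k : Int)) ≠ -1 := by omega
    rw [if_neg hkne, if_neg hkne]
    have hkget : code.toList[k]? = some '[' := (single_prefix_iff '[' code.toList k).mp hpre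
    have hklen : k < code.toList.length := by
      by_contra h
      rw [List.getElem?_eq_none (by omega : code.toList.length ≤ k)] at hkget
      exact absurd hkget (by simp)
    have hno : ∀ j, k+1 ≤ j → code.toList[j]? ≠ some '[' := by
      intro j hj hcj
      by_cases hjl : j ≤ code.toList.length
      · exact hmax j (by omega) hjl ((single_prefix_iff '[' code.toList j).mpr hcj)
      · rw [List.getElem?_eq_none (by omega : code.toList.length ≤ j)] at hcj
        exact absurd hcj (by simp)
    -- A side: the first iteration consumes the '[' at k and raises depth to 1
    have hA : stripLoopA code code.toList k k 0 = stripLoopA code code.toList k (k+1) 1 := by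
      rw [stripLoopA]
      simp only [dif_pos hklen]
      rw [if_pos (by rw [List.getElem?_eq_getElem hklen] at hkget; injection hkget)]
      norm_num
    rw [Int.toNat_natCast, hA, loopA_depth_one code code.toList k (k+1) hno]
    -- B side
    by_cases he : PySem.Chars.findFrom code.toList [']'] (k : Int) none = -1
    · rw [if_pos he]
      have h1 := (PySem.Chars.findFrom_natCast_eq_neg_one_iff code.toList [']'] k (by omega)).mp he
      have hall : ∀ j, k+1 ≤ j → code.toList[j]? ≠ some ']' := by
        intro j hj hcj
        have hp : [']'] <+: (code.toList.drop k).drop (j - k) := by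
          rw [List.drop_drop]
          rw [show k + (j - k) = j by omega]
          exact (single_prefix_iff ']' code.toList j).mpr hcj
        exact h1 (hp.isInfix.trans (List.drop_suffix _ _).isInfix)
      rw [(firstClose_none_iff code.toList (k+1)).mpr hall]
    · rw [if_neg he]
      obtain ⟨hle, hpre2, hmin⟩ :=
        PySem.Chars.findFrom_natCast_spec code.toList [']'] k (by omega) he
      set e := PySem.Chars.findFrom code.toList [']'] (k : Int) none with hedef
      have heE : e = ((e.toNat : Nat) : Int) := (Int.toNat_of_nonneg (by omega)).symm
      have hEget : code.toList[e.toNat]? = some ']' := (single_prefix_iff ']' code.toList e.toNat).mp hpre2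
      have hEne : e.toNat ≠ k := by
        intro h
        rw [h, hkget] at hEget
        exact absurd hEget (by simp)
      have hkE : k + 1 ≤ e.toNat := by omega
      have hfc : firstClose code.toList (k+1) = some e.toNat :=
        firstClose_eq_some code.toList (k+1) e.toNat hkE hEget
          (fun j hj hj' hcj => hmin j (by omega) hj' ((single_prefix_iff ']' code.toList j).mpr hcj))
      rw [hfc]
      rw [PySem.List.slice_to_natCast, heE,
        show ((e.toNat : Int)) + 1 = (((e.toNat + 1 : Nat)) : Int) by push_cast; ring,
        PySem.List.slice_from_natCast]
      rw [Int.toNat_natCast]
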